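-- pv_equiv track=rewrite | github.com/xxxhol1c/PTA-Python | programming/4-15.py | partition_coin
-- ===== SOURCE A (Python) =====
-- def descending_coin(coin): # make the list of coins
--     if coin == 5:
--         return 2
--     elif coin == 2:
--         return 1
--
-- def partition_coin(change, largest_coin): # make the list of all partition
--     if change == 0:
--         return [[]]
--     elif change < 0 or largest_coin == None:
--         return []
--     else:
--         using_coin = partition_coin(change - largest_coin, largest_coin)
--         with_coin = list(map(lambda s: [largest_coin] + s, using_coin))
--         without_coin = partition_coin(change, descending_coin(largest_coin))
--         return with_coin + without_coin
-- ===== SOURCE B (Python) =====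
-- def descending_coin(coin): # make the list of coins
--     if coin == 5:
--         return 2
--     elif coin == 2:
--         return 1
--
--
-- def _parts(amount, coins):
--     # multiplicity recursion over the flattened coin list
--     if not coins:
--         return [[]] if amount == 0 else []
--     if amount == 0:
--         return [[]]
--     if amount < 0:
--         return []
--     c = coins[0]
--     return [[c] * k + tail
--             for k in range(amount // c, -1, -1)
--             for tail in _parts(amount - k * c, coins[1:])]
--
--
-- def partition_coin(change, largest_coin):
--     # First flatten the descending_coin chain into an explicit coin list,
--     # then recurse over that list choosing the multiplicity of each coin.
--     coins = []
--     while largest_coin is not None: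
--         coins.append(largest_coin)
--         largest_coin = descending_coin(largest_coin)
--     return _parts(change, coins)
-- ===== Notes on version B (the rewrite author's own statement) =====
-- stated objective: alternative
-- what changed: Replaces A's binary use-one/skip-to-next-coin recursion on an Optional coin by first materialising the descending_coin chain as an explicit coin list and then recursing structurally over that list, choosing the multiplicity k of each coin in one descending loop.
-- outside the precondition, e.g. on partition_coin(3, 0): A does not finish within the time limit, B raises ZeroDivisionError; on partition_coin(3, -2): A does not finish within the time limit, B returns []
import Mathlib
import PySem

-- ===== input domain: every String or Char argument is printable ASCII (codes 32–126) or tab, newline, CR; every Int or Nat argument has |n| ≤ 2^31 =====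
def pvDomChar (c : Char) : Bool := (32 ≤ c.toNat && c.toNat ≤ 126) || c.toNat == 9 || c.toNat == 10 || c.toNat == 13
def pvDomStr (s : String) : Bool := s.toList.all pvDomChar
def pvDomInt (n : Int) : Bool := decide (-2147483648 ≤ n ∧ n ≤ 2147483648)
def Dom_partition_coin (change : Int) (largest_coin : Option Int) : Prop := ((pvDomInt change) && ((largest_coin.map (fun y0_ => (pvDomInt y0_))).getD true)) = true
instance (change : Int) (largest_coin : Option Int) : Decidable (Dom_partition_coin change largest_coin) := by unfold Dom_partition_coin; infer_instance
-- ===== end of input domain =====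

-- B first flattens the descending_coin chain into an explicit coin list and then
-- recurses structurally over that list, choosing the multiplicity of each coin
-- in one descending loop (alternative decomposition; A uses binary use-it/skip-it
-- recursion on an Optional coin).

-- ===== PORT A =====
def descending_coin (coin : Int) : Option Int :=
  if coin = 5 then some 2
  else if coin = 2 then some 1
  else none

-- A's recursion diverges when change > 0 and the coin is ≤ 0; the port uses a
-- fuel counter (4 * change.toNat + 4 always suffices on Pre_ inputs) to stay total.
def pcGoA : Nat → Int → Option Int → List (List Int)
  | 0, _, _ => []
  | fuel + 1, change, largest_coin =>
    if change = 0 then [[]]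
    else if change < 0 ∨ largest_coin = none then []
    else
      match largest_coin with
      | none => []
      | some c =>
        let using_coin := pcGoA fuel (change - c) (some c)
        let with_coin := using_coin.map (fun s => c :: s)
        let without_coin := pcGoA fuel change (descending_coin c)
        with_coin ++ without_coin

def partition_coin (change : Int) (largest_coin : Option Int) : List (List Int) :=
  pcGoA (4 * change.toNat + 4) change largest_coin

-- ===== PORT B =====
-- rank of a coin in the descending_coin chain (termination measure for coin_chain)
def pcRank : Option Int → Nat
  | none => 0
  | some c => if c = 5 then 3 else if c = 2 then 2 else 1

theorem pcRank_desc_lt (c : Int) : pcRank (descending_coin c) < pcRank (some c) := by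
  unfold pcRank descending_coin
  by_cases h5 : c = 5 <;> by_cases h2 : c = 2 <;> simp [h5, h2]

-- the while-loop of Source B collecting the descending_coin chain
def coin_chain : Option Int → List Int
  | none => []
  | some c => c :: coin_chain (descending_coin c)
termination_by lc => pcRank lc
decreasing_by exact pcRank_desc_lt _

-- Source B's _parts: structural recursion over the coin list, multiplicity loop per coin
def pcParts : Int → List Int → List (List Int)
  | amount, [] => if amount = 0 then [[]] else []
  | amount, c :: rest =>
    if amount = 0 then [[]]
    else if amount < 0 then []
    else
      ((PySem.List.pyRange (PySem.Int.floordiv amount c) (-1) (-1)).map (fun k =>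
        (pcParts (amount - k * c) rest).map
          (fun tail => List.replicate k.toNat c ++ tail))).flatten

def partition_coin_alt (change : Int) (largest_coin : Option Int) : List (List Int) :=
  pcParts change (coin_chain largest_coin)

-- ===== PRECONDITION & SPEC =====
-- Pre_ excludes exactly the inputs on which A never returns (infinite recursion):
-- change > 0 together with a present coin ≤ 0.
def Pre_partition_coin (change : Int) (largest_coin : Option Int) : Prop :=
  change ≤ 0 ∨ 0 < largest_coin.getD 1
instance (change : Int) (largest_coin : Option Int) : Decidable (Pre_partition_coin change largest_coin) := by unfold Pre_partition_coin; infer_instance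

def pvWitness_partition_coin : Int × Option Int := (9, some 5)

def Spec_partition_coin (change : Int) (largest_coin : Option Int) (out : List (List Int)) : Prop := out = partition_coin_alt change largest_coin
instance (change : Int) (largest_coin : Option Int) (out : List (List Int)) : Decidable (Spec_partition_coin change largest_coin out) := by unfold Spec_partition_coin; infer_instance

-- ===== CLAIM (what is proved, stated in full; the proofs are below) =====
def Claim_equal_partition_coin : Prop := ∀ (change : Int) (largest_coin : Option Int), Dom_partition_coin change largest_coin → Pre_partition_coin change largest_coin → Spec_partition_coin change largest_coin (partition_coin change largest_coin)

-- ===== LEMMAS AND PROOFS =====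

theorem pre_desc (change c : Int) : Pre_partition_coin change (descending_coin c) := by
  unfold Pre_partition_coin descending_coin
  split_ifs <;> simp

-- one-step unfolding lemmas for pcParts
theorem pcParts_zero (coins : List Int) : pcParts 0 coins = [[]] := by
  cases coins <;> simp [pcParts]

theorem pcParts_cons_pos (amount c : Int) (rest : List Int)
    (h0 : ¬ amount = 0) (hn : ¬ amount < 0) :
    pcParts amount (c :: rest) =
      ((PySem.List.pyRange (PySem.Int.floordiv amount c) (-1) (-1)).map (fun k =>
        (pcParts (amount - k * c) rest).map
          (fun tail => List.replicate k.toNat c ++ tail))).flatten := by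
  simp only [pcParts, if_neg h0, if_neg hn]

theorem pcParts_cons_neg (amount c : Int) (rest : List Int)
    (h0 : ¬ amount = 0) (hn : amount < 0) :
    pcParts amount (c :: rest) = [] := by
  simp only [pcParts, if_neg h0, if_pos hn]

-- countdown-range bookkeeping
theorem range_shift (K : Int) (hK : 0 ≤ K) :
    (PySem.List.pyRange (K - 1) (-1) (-1)).map (fun k => k + 1) = PySem.List.pyRange K 0 (-1) := by
  rw [PySem.List.pyRange_neg_one, PySem.List.pyRange_neg_one, List.map_map]
  have h1 : (K - 1 - (-1)).toNat = K.toNat := by omega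
  have h2 : (K - 0).toNat = K.toNat := by omega
  rw [h1, h2]
  apply List.map_congr_left
  intro k _
  simp only [Function.comp_apply]
  omega

theorem range_split (K : Int) (hK : 0 ≤ K) :
    PySem.List.pyRange K (-1) (-1) = PySem.List.pyRange K 0 (-1) ++ [0] := by
  rw [PySem.List.pyRange_neg_one, PySem.List.pyRange_neg_one]
  have h1 : (K - (-1)).toNat = K.toNat + 1 := by omega
  have h2 : (K - 0).toNat = K.toNat := by omega
  rw [h1, h2, List.range_succ, List.map_append]
  simp only [List.map_cons, List.map_nil]
  congr 2
  omega

-- unrolling of B's multiplicity loop: one copy of the head coin peeled off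
theorem parts_unroll (amount c : Int) (rest : List Int) (hch : 0 < amount) (hc : 0 < c) :
    pcParts amount (c :: rest) =
      (pcParts (amount - c) (c :: rest)).map (fun s => c :: s) ++ pcParts amount rest := by
  have hK : PySem.Int.floordiv amount c = amount / c := PySem.Int.floordiv_eq_ediv_of_pos hc
  have hK0 : 0 ≤ amount / c := Int.ediv_nonneg (by omega) (by omega)
  rw [pcParts_cons_pos amount c rest (by omega) (by omega)]
  rw [hK, range_split _ hK0, List.map_append, List.flatten_append]
  simp only [List.map_cons, List.map_nil, List.flatten_cons, List.flatten_nil, List.append_nil]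
  have hF0 : (pcParts (amount - 0 * c) rest).map
      (fun tail => List.replicate ((0:Int)).toNat c ++ tail) = pcParts amount rest := by
    simp
  rw [hF0]
  congr 1
  -- the k ≥ 1 part equals  map (c :: ·) (pcParts (amount - c) (c :: rest))
  by_cases hlt : amount < c
  · have hKz : amount / c = 0 := Int.ediv_eq_zero_of_lt (by omega) hlt
    have hB1 : pcParts (amount - c) (c :: rest) = [] :=
      pcParts_cons_neg _ _ _ (by omega) (by omega)
    rw [hB1, hKz, PySem.List.pyRange_neg_one_eq_nil (by omega)]
    simp
  · -- amount ≥ c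
    rw [← range_shift (amount / c) hK0, List.map_map]
    have hKsub : (amount - c) / c = amount / c - 1 := by
      rw [show amount - c = amount + (-1) * c by ring,
        Int.add_mul_ediv_right _ _ (by omega : c ≠ 0)]
      omega
    by_cases hEq : amount = c
    · -- amount - c = 0 : both sides are [[c]]
      have hKone : amount / c = 1 := by rw [hEq]; exact Int.ediv_self (by omega)
      have hB1 : pcParts (amount - c) (c :: rest) = [[]] := by
        rw [show amount - c = 0 by omega]; exact pcParts_zero _
      rw [hB1, hKone]
      rw [show (1 : Int) - 1 = 0 by ring]
      rw [PySem.List.pyRange_neg_one_cons (by omega), PySem.List.pyRange_neg_one_eq_nil (by omega)]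
      simp only [List.map_cons, List.map_nil, Function.comp_apply]
      rw [show amount - (0 + 1) * c = 0 by omega, pcParts_zero]
      simp
    · -- amount > c : unfold pcParts (amount - c) (c :: rest) as its own countdown flatten
      have hcc : 0 < amount - c := by omega
      have hB1 : pcParts (amount - c) (c :: rest) =
          ((PySem.List.pyRange (amount / c - 1) (-1) (-1)).map (fun k =>
            (pcParts (amount - c - k * c) rest).map
              (fun tail => List.replicate k.toNat c ++ tail))).flatten := by
        rw [pcParts_cons_pos _ c rest (by omega) (by omega),
          PySem.Int.floordiv_eq_ediv_of_pos hc, hKsub]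
      rw [hB1, List.map_flatten, List.map_map]
      congr 1
      apply List.map_congr_left
      intro k hk
      have hk0 : 0 ≤ k := by
        have := (PySem.List.mem_pyRange_neg_one).mp hk
        omega
      simp only [Function.comp_apply, List.map_map]
      have harg : amount - (k + 1) * c = amount - c - k * c := by ring
      rw [harg]
      apply List.map_congr_left
      intro t _
      simp only [Function.comp_apply]
      have : ((k + 1 : Int)).toNat = k.toNat + 1 := by omega
      rw [this, List.replicate_succ]
      simp

-- main induction: A with enough fuel equals B's list-based recursion
theorem pcGoA_eq_alt : ∀ (fuel : Nat) (change : Int) (lc : Option Int),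
    Pre_partition_coin change lc →
    4 * change.toNat + pcRank lc + 1 ≤ fuel →
    pcGoA fuel change lc = pcParts change (coin_chain lc) := by
  intro fuel
  induction fuel with
  | zero => intro change lc _ h; omega
  | succ fuel ih =>
    intro change lc hpre hb
    by_cases h0 : change = 0
    · subst h0
      simp [pcGoA, pcParts_zero]
    by_cases hneg : change < 0
    · cases lc with
      | none => simp [pcGoA, coin_chain, pcParts, h0, hneg]
      | some c =>
        rw [coin_chain, pcParts_cons_neg _ _ _ h0 hneg]
        simp [pcGoA, h0, hneg]
    cases lc with
    | none => simp [pcGoA, coin_chain, pcParts, h0, hneg]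
    | some c =>
      have hc : 0 < c := by
        rcases hpre with h | h
        · omega
        · simpa using h
      have hch : 0 < change := by omega
      have hr := pcRank_desc_lt c
      have hr3 : pcRank (some c) ≤ 3 := by simp only [pcRank]; split_ifs <;> omega
      simp only [pcGoA, if_neg h0,
        if_neg (by simp; omega : ¬ (change < 0 ∨ (some c : Option Int) = none))]
      rw [ih (change - c) (some c) (Or.inr (by simpa using hc))
          (by have : (change - c).toNat ≤ change.toNat - 1 := by omega
              omega),
        ih change (descending_coin c) (pre_desc change c) (by omega),
        coin_chain, parts_unroll change c _ hch hc]

-- ===== VERDICT (by name: the statement is the Claim_ definition above) =====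
theorem partition_coin_spec : Claim_equal_partition_coin := by
  intro change lc _ hpre
  show partition_coin change lc = partition_coin_alt change lc
  have hr3 : pcRank lc ≤ 3 := by
    cases lc with
    | none => simp [pcRank]
    | some c => simp only [pcRank]; split_ifs <;> omega
  exact pcGoA_eq_alt _ change lc hpre (by omega)
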